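-- pv_equiv track=rewrite | github.com/pypi-data/pypi-mirror-403 | packages/tinybird/tinybird-3.1.0.dev0.tar.gz/tinybird-3.1.0.dev0/tinybird/datafile/common.py | clean_comments_rstrip_keep_empty_lines
-- ===== SOURCE A (Python) =====
-- from typing import Any, Callable, Dict, Iterable, List, Literal, NamedTuple, Optional, Tuple, cast
--
-- def clean_comments_rstrip_keep_empty_lines(schema_to_clean: Optional[str]) -> str:
--     """Remove the comments from the schema
--     If the comments are between backticks, they will not be removed.
--     Lines that are empty after removing comments are also removed. Lines are only rstripped of whitespaces
--     >>> clean_comments_rstrip_keep_empty_lines(None)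
--     ''
--     >>> clean_comments_rstrip_keep_empty_lines('')
--     ''
--     >>> clean_comments_rstrip_keep_empty_lines('    ')
--     ''
--     >>> clean_comments_rstrip_keep_empty_lines('\\n')
--     ''
--     >>> clean_comments_rstrip_keep_empty_lines('\\n\\n\\n\\n')
--     ''
--     >>> clean_comments_rstrip_keep_empty_lines('c Float32')
--     'c Float32'
--     >>> clean_comments_rstrip_keep_empty_lines('c Float32\\n')
--     'c Float32'
--     >>> clean_comments_rstrip_keep_empty_lines('c Float32\\n--this is a comment')
--     'c Float32'
--     >>> clean_comments_rstrip_keep_empty_lines('c Float32\\n--this is a comment\\n')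
--     'c Float32'
--     >>> clean_comments_rstrip_keep_empty_lines('c Float32\\t-- this is a comment\\t\\n')
--     'c Float32'
--     >>> clean_comments_rstrip_keep_empty_lines('c Float32\\n--this is a comment\\r\\n')
--     'c Float32'
--     >>> clean_comments_rstrip_keep_empty_lines('c Float32\\n--this is a comment\\n--this is a comment2\\n')
--     'c Float32'
--     >>> clean_comments_rstrip_keep_empty_lines('c Float32\\n--this is a ```comment\\n')
--     'c Float32'
--     >>> clean_comments_rstrip_keep_empty_lines('c Float32\\n--this is a ```comment\\n')
--     'c Float32'
--     >>> clean_comments_rstrip_keep_empty_lines('c Float32, -- comment\\nd Float32 -- comment2')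
--     'c Float32,\\nd Float32'
--     >>> clean_comments_rstrip_keep_empty_lines('c Float32, -- comment\\n   -- comment \\nd Float32 -- comment2')
--     'c Float32,\\n\\nd Float32'
--     >>> clean_comments_rstrip_keep_empty_lines('c Float32 `json:$.aa--aa`\\n--this is a ```comment\\n')
--     'c Float32 `json:$.aa--aa`'
--     >>> clean_comments_rstrip_keep_empty_lines('c Float32 `json:$.cc--cc`\\nd Float32 `json:$.dd--dd`\\n--this is a ```comment\\n')
--     'c Float32 `json:$.cc--cc`\\nd Float32 `json:$.dd--dd`'
--     >>> clean_comments_rstrip_keep_empty_lines('c--c Float32 `json:$.cc--cc`\\n')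
--     'c'
--     >>> clean_comments_rstrip_keep_empty_lines('`c--c` Float32 `json:$.cc--cc`\\n')
--     '`c'
--     """
--
--     def clean_line_comments(line: str) -> str:
--         if not line:
--             return line
--         i = 0
--         inside_json_path = False
--         while i < len(line):
--             if i + 1 < len(line) and line[i] == "-" and line[i + 1] == "-" and not inside_json_path:
--                 return line[:i].rstrip()
--
--             if not inside_json_path and line[i:].startswith("`json:"):
--                 inside_json_path = True
--             elif inside_json_path and line[i] == "`":
--                 inside_json_path = False
--             i += 1
--         return line
--
--     if schema_to_clean is None:
--         return ""
--
--     cleaned_schema = ""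
--     for line in schema_to_clean.splitlines():
--         cleaned_line = clean_line_comments(line)
--         cleaned_schema += cleaned_line + "\n"
--     return cleaned_schema.rstrip()
-- ===== SOURCE B (Python) =====
-- from typing import Optional
--
--
-- def clean_comments_rstrip_keep_empty_lines(schema_to_clean: Optional[str]) -> str:
--     """Same cleaning as A, but each line is cleaned by jumping between markers
--     with str.find instead of a char-by-char state machine."""
--
--     def clean_line(line: str) -> str:
--         pos = 0
--         while True:
--             a = line.find("--", pos)
--             b = line.find("`json:", pos)
--             if a != -1 and (b == -1 or a < b):
--                 return line[:a].rstrip()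
--             if b == -1:
--                 return line
--             c = line.find("`", b + 1)
--             if c == -1:
--                 return line
--             pos = c + 1
--
--     if schema_to_clean is None:
--         return ""
--     return "\n".join(clean_line(line) for line in schema_to_clean.splitlines()).rstrip()
-- ===== Notes on version B (the rewrite author's own statement) =====
-- stated objective: faster
-- what changed: The per-line cleaner is rewritten from A's char-by-char state machine (index plus inside_json_path flag updated at every character) into a find-driven traversal that jumps directly between the next comment marker, json-path opener and closing backtick, and the cleaned lines are joined with str.join instead of string concatenation in a loop.
import Mathlib
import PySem

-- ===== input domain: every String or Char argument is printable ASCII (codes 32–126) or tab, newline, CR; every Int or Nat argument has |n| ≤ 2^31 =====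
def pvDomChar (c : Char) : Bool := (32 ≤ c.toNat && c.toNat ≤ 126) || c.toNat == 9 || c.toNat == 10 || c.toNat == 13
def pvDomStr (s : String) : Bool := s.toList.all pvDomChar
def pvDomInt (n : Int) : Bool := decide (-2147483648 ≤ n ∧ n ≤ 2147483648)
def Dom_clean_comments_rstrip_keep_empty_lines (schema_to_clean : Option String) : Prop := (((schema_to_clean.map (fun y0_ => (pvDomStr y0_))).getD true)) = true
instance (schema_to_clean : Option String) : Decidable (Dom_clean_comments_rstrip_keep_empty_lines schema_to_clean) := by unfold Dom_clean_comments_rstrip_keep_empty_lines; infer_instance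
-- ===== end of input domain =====

-- B rewrites the per-line cleaner as a find-driven jump between markers instead of A's
-- char-by-char state machine, and joins the cleaned lines with "\n".join; same result.

-- ===== PORT A =====
-- A's inner while loop: i = index, inside = inside_json_path, rest = line[i:].
def pvCleanLineA_go (line : List Char) : Nat → Bool → List Char → List Char
  | _, _, [] => line
  | i, inside, c :: rs =>
    if inside = false ∧ c = '-' ∧ rs.head? = some '-' then
      PySem.Chars.rstrip (line.take i)
    else if inside = false ∧ PySem.Chars.startswith (c :: rs) ['`','j','s','o','n',':'] = true then
      pvCleanLineA_go line (i+1) true rs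
    else if inside = true ∧ c = '`' then
      pvCleanLineA_go line (i+1) false rs
    else
      pvCleanLineA_go line (i+1) inside rs

-- A's clean_line_comments
def pvCleanLineA (line : List Char) : List Char :=
  if line.isEmpty then line else pvCleanLineA_go line 0 false line

def clean_comments_rstrip_keep_empty_lines (schema_to_clean : Option String) : String :=
  match schema_to_clean with
  | none => ""
  | some s =>
    String.ofList (PySem.Chars.rstrip
      ((PySem.Chars.splitlines s.toList).foldl
        (fun acc l => acc ++ (pvCleanLineA l ++ ['\n'])) []))

-- ===== PORT B =====
-- B's inner while True loop: pos jumps between find results; fuel (line.length + 1) is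
-- only a totality guard, each jump advances pos by at least 2.
def pvCleanLineB_go (line : List Char) : Nat → Nat → List Char
  | 0, _ => line
  | fuel+1, pos =>
    if PySem.Chars.findFrom line ['-','-'] (pos : Int) ≠ -1 ∧
       (PySem.Chars.findFrom line ['`','j','s','o','n',':'] (pos : Int) = -1 ∨
        PySem.Chars.findFrom line ['-','-'] (pos : Int) <
          PySem.Chars.findFrom line ['`','j','s','o','n',':'] (pos : Int)) then
      PySem.Chars.rstrip (line.take (PySem.Chars.findFrom line ['-','-'] (pos : Int)).toNat)
    else if PySem.Chars.findFrom line ['`','j','s','o','n',':'] (pos : Int) = -1 then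
      line
    else if PySem.Chars.findFrom line ['`']
        (((PySem.Chars.findFrom line ['`','j','s','o','n',':'] (pos : Int)).toNat + 1 : Nat) : Int) = -1 then
      line
    else
      pvCleanLineB_go line fuel
        ((PySem.Chars.findFrom line ['`']
          (((PySem.Chars.findFrom line ['`','j','s','o','n',':'] (pos : Int)).toNat + 1 : Nat) : Int)).toNat + 1)

-- B's clean_line
def pvCleanLineB (line : List Char) : List Char :=
  pvCleanLineB_go line (line.length + 1) 0

def clean_comments_rstrip_keep_empty_lines_alt (schema_to_clean : Option String) : String :=
  match schema_to_clean with
  | none => ""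
  | some s =>
    String.ofList (PySem.Chars.rstrip
      (PySem.Chars.join ['\n'] ((PySem.Chars.splitlines s.toList).map pvCleanLineB)))

-- ===== PRECONDITION & SPEC =====
def Spec_clean_comments_rstrip_keep_empty_lines (schema_to_clean : Option String) (out : String) : Prop := out = clean_comments_rstrip_keep_empty_lines_alt schema_to_clean
instance (schema_to_clean : Option String) (out : String) : Decidable (Spec_clean_comments_rstrip_keep_empty_lines schema_to_clean out) := by unfold Spec_clean_comments_rstrip_keep_empty_lines; infer_instance

-- ===== CLAIM (what is proved, stated in full; the proofs are below) =====
def Claim_equal_clean_comments_rstrip_keep_empty_lines : Prop := ∀ (schema_to_clean : Option String), Dom_clean_comments_rstrip_keep_empty_lines schema_to_clean → Spec_clean_comments_rstrip_keep_empty_lines schema_to_clean (clean_comments_rstrip_keep_empty_lines schema_to_clean)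

-- ===== LEMMAS AND PROOFS =====

-- findFrom facts, derived from the PySem spec lemmas
theorem pvFind_hit (s sub : List Char) (k : Nat) (hk : k ≤ s.length) (h : sub <+: s.drop k) :
    PySem.Chars.findFrom s sub (k : Int) = (k : Int) := by
  rw [PySem.Chars.findFrom_natCast s sub k hk]
  have hnn : 0 ≤ PySem.Chars.find (s.drop k) sub :=
    (PySem.Chars.find_nonneg_iff _ _).2 h.isInfix
  have h0 : PySem.Chars.find (s.drop k) sub = 0 := by
    by_contra hne
    rcases PySem.Chars.find_spec hnn with ⟨_, hmin⟩
    exact hmin 0 (by omega) (by simpa using h)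
  rw [h0]
  norm_num

theorem pvFind_step (s sub : List Char) (k : Nat) (hk : k < s.length) (h : ¬ sub <+: s.drop k) :
    PySem.Chars.findFrom s sub (k : Int) = PySem.Chars.findFrom s sub ((k+1 : Nat) : Int) := by
  have hc : s.drop k = s[k] :: s.drop (k+1) := List.drop_eq_getElem_cons hk
  rw [PySem.Chars.findFrom_natCast s sub k (le_of_lt hk),
      PySem.Chars.findFrom_natCast s sub (k+1) hk]
  by_cases hinf : sub <:+: s.drop (k+1)
  · have hinf0 : sub <:+: s.drop k := by rw [hc]; exact List.infix_cons_iff.2 (Or.inr hinf)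
    have h1 : 0 ≤ PySem.Chars.find (s.drop k) sub := (PySem.Chars.find_nonneg_iff _ _).2 hinf0
    have h2 : 0 ≤ PySem.Chars.find (s.drop (k+1)) sub := (PySem.Chars.find_nonneg_iff _ _).2 hinf
    rcases PySem.Chars.find_spec h1 with ⟨p1, m1⟩
    rcases PySem.Chars.find_spec h2 with ⟨p2, m2⟩
    have hdd : ∀ j : Nat, (s.drop (k+1)).drop j = (s.drop k).drop (j+1) := by
      intro j; rw [List.drop_drop, List.drop_drop]; congr 1; omega
    have hf1pos : (PySem.Chars.find (s.drop k) sub).toNat ≠ 0 := by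
      intro h0
      rw [h0] at p1
      exact h (by simpa using p1)
    have le1 : (PySem.Chars.find (s.drop k) sub).toNat ≤ (PySem.Chars.find (s.drop (k+1)) sub).toNat + 1 := by
      by_contra hlt
      push Not at hlt
      exact (m1 ((PySem.Chars.find (s.drop (k+1)) sub).toNat + 1) (by omega)) (by rw [← hdd]; exact p2)
    have le2 : (PySem.Chars.find (s.drop (k+1)) sub).toNat ≤ (PySem.Chars.find (s.drop k) sub).toNat - 1 := by
      by_contra hlt
      push Not at hlt
      apply m2 ((PySem.Chars.find (s.drop k) sub).toNat - 1) (by omega)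
      rw [hdd]
      have he : (PySem.Chars.find (s.drop k) sub).toNat - 1 + 1 = (PySem.Chars.find (s.drop k) sub).toNat := by omega
      rw [he]
      exact p1
    have hne1 : PySem.Chars.find (s.drop k) sub ≠ -1 := by omega
    have hne2 : PySem.Chars.find (s.drop (k+1)) sub ≠ -1 := by omega
    rw [if_neg hne1, if_neg hne2]
    omega
  · have hinf0 : ¬ sub <:+: s.drop k := by
      rw [hc, List.infix_cons_iff]
      push Not
      exact ⟨by rw [← hc]; exact h, hinf⟩
    rw [(PySem.Chars.find_eq_neg_one_iff _ _).2 hinf0, (PySem.Chars.find_eq_neg_one_iff _ _).2 hinf]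
    simp

theorem pvFind_end (s sub : List Char) (hsub : sub ≠ []) :
    PySem.Chars.findFrom s sub (s.length : Int) = -1 := by
  rw [PySem.Chars.findFrom_natCast_eq_neg_one_iff s sub s.length le_rfl]
  simp [hsub]

theorem pvFind_bounds (s sub : List Char) (k : Nat) (hk : k ≤ s.length) (hsub : sub ≠ [])
    (h : PySem.Chars.findFrom s sub (k : Int) ≠ -1) :
    (k : Int) ≤ PySem.Chars.findFrom s sub (k : Int) ∧
      (PySem.Chars.findFrom s sub (k : Int)).toNat < s.length ∧
      k ≤ (PySem.Chars.findFrom s sub (k : Int)).toNat := by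
  rcases PySem.Chars.findFrom_natCast_spec s sub k hk h with ⟨h1, h2, _⟩
  have hne : s.drop (PySem.Chars.findFrom s sub (k : Int)).toNat ≠ [] := by
    intro he
    rw [he] at h2
    exact hsub (List.prefix_nil.mp h2)
  have h3 : ¬ s.length ≤ (PySem.Chars.findFrom s sub (k : Int)).toNat :=
    fun hle => hne (List.drop_eq_nil_iff.2 hle)
  refine ⟨h1, by omega, by omega⟩

-- the inside_json_path mode of A's scanner is a search for the next backtick
theorem pvInside (ln : List Char) (m : Nat) : ∀ i : Nat, ln.length - i ≤ m → i ≤ ln.length →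
    pvCleanLineA_go ln i true (ln.drop i) =
      if PySem.Chars.findFrom ln ['`'] (i : Int) = -1 then ln
      else pvCleanLineA_go ln ((PySem.Chars.findFrom ln ['`'] (i : Int)).toNat + 1) false
        (ln.drop ((PySem.Chars.findFrom ln ['`'] (i : Int)).toNat + 1)) := by
  induction m with
  | zero =>
    intro i hm hi
    have he : i = ln.length := by omega
    subst he
    rw [List.drop_length, pvFind_end ln ['`'] (by simp), if_pos rfl]
    rfl
  | succ m ih =>
    intro i hm hi
    rcases eq_or_lt_of_le hi with he | hlt
    · subst he
      rw [List.drop_length, pvFind_end ln ['`'] (by simp), if_pos rfl]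
      rfl
    · have hc : ln.drop i = ln[i] :: ln.drop (i+1) := List.drop_eq_getElem_cons hlt
      by_cases hb : ln[i] = '`'
      · have hpre : ['`'] <+: ln.drop i := by
          rw [hc]
          simp [List.cons_prefix_cons, hb]
        have hf := pvFind_hit ln ['`'] i (le_of_lt hlt) hpre
        rw [hc]
        show pvCleanLineA_go ln i true (ln[i] :: ln.drop (i+1)) = _
        rw [pvCleanLineA_go]
        rw [if_neg (by simp), if_neg (by simp), if_pos ⟨rfl, hb⟩, hf]
        rw [if_neg (by omega)]
        norm_num
      · have hpre : ¬ ['`'] <+: ln.drop i := by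
          rw [hc]
          intro h'
          rw [List.cons_prefix_cons] at h'
          exact hb h'.1.symm
        have hstep := pvFind_step ln ['`'] i hlt hpre
        rw [hc]
        show pvCleanLineA_go ln i true (ln[i] :: ln.drop (i+1)) = _
        rw [pvCleanLineA_go]
        rw [if_neg (by simp), if_neg (by simp), if_neg (by simp [hb]), hstep]
        exact ih (i+1) (by omega) hlt

-- main per-ln equivalence in the outside state
theorem pvOutsideEnd (ln : List Char) (fuel : Nat) (hf : 0 < fuel) :
    pvCleanLineA_go ln ln.length false (ln.drop ln.length) =
      pvCleanLineB_go ln fuel ln.length := by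
  obtain ⟨fu, rfl⟩ : ∃ fu, fuel = fu + 1 := ⟨fuel - 1, by omega⟩
  rw [List.drop_length, pvCleanLineB_go]
  rw [pvFind_end ln ['-','-'] (by simp), pvFind_end ln ['`','j','s','o','n',':'] (by simp)]
  rw [if_neg (by simp), if_pos rfl]
  rfl

theorem pvOutside (ln : List Char) (m : Nat) : ∀ fuel pos : Nat,
    ln.length - pos ≤ m → pos ≤ ln.length → ln.length - pos < fuel →
    pvCleanLineA_go ln pos false (ln.drop pos) = pvCleanLineB_go ln fuel pos := by
  induction m with
  | zero =>
    intro fuel pos hm hp hf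
    have he : pos = ln.length := by omega
    subst he
    exact pvOutsideEnd ln fuel (by omega)
  | succ m ih =>
    intro fuel pos hm hp hf
    rcases eq_or_lt_of_le hp with he | hlt
    · subst he
      exact pvOutsideEnd ln fuel (by omega)
    · have hc : ln.drop pos = ln[pos] :: ln.drop (pos+1) := List.drop_eq_getElem_cons hlt
      obtain ⟨fu, rfl⟩ : ∃ fu, fuel = fu + 1 := ⟨fuel - 1, by omega⟩
      by_cases hdash : ln[pos] = '-' ∧ (ln.drop (pos+1)).head? = some '-'
      · -- a comment starts at pos
        have hpre : ['-','-'] <+: ln.drop pos := by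
          rw [hc]
          rcases hdash with ⟨h1, h2⟩
          cases hd2 : ln.drop (pos+1) with
          | nil => rw [hd2] at h2; simp at h2
          | cons d ds =>
            rw [hd2] at h2
            simp only [List.head?_cons, Option.some.injEq] at h2
            simp [List.cons_prefix_cons, h1, h2]
        have hnj : ¬ ['`','j','s','o','n',':'] <+: ln.drop pos := by
          rw [hc]
          intro hp'
          rw [List.cons_prefix_cons] at hp'
          rw [hdash.1] at hp'
          simp at hp'
        have ha := pvFind_hit ln ['-','-'] pos (le_of_lt hlt) hpre
        have hbj := pvFind_step ln ['`','j','s','o','n',':'] pos hlt hnj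
        rw [hc]
        show pvCleanLineA_go ln pos false (ln[pos] :: ln.drop (pos+1)) = _
        rw [pvCleanLineA_go, if_pos ⟨rfl, hdash.1, hdash.2⟩]
        rw [pvCleanLineB_go, ha]
        have hcond : (pos : Int) ≠ -1 ∧
            (PySem.Chars.findFrom ln ['`','j','s','o','n',':'] (pos : Int) = -1 ∨
             (pos : Int) < PySem.Chars.findFrom ln ['`','j','s','o','n',':'] (pos : Int)) := by
          refine ⟨by omega, ?_⟩
          by_cases hb1 : PySem.Chars.findFrom ln ['`','j','s','o','n',':'] (pos : Int) = -1
          · exact Or.inl hb1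
          · right
            rw [hbj] at hb1 ⊢
            have := (pvFind_bounds ln ['`','j','s','o','n',':'] (pos+1) hlt (by simp) hb1).1
            omega
        rw [if_pos hcond]
        norm_num
      · -- no comment starts at pos
        have hndash : ¬ ['-','-'] <+: ln.drop pos := by
          rw [hc]
          intro hp'
          rw [List.cons_prefix_cons] at hp'
          apply hdash
          refine ⟨hp'.1.symm, ?_⟩
          rcases hp'.2 with ⟨t, ht⟩
          rw [← ht]
          rfl
        have ha := pvFind_step ln ['-','-'] pos hlt hndash
        by_cases hjs : ['`','j','s','o','n',':'] <+: ln.drop pos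
        · -- a json path opens at pos
          have hb := pvFind_hit ln ['`','j','s','o','n',':'] pos (le_of_lt hlt) hjs
          have hsw : PySem.Chars.startswith (ln[pos] :: ln.drop (pos+1)) ['`','j','s','o','n',':'] = true := by
            rw [← hc]
            exact List.isPrefixOf_iff_prefix.2 hjs
          rw [hc]
          show pvCleanLineA_go ln pos false (ln[pos] :: ln.drop (pos+1)) = _
          rw [pvCleanLineA_go]
          rw [if_neg (by
            intro hg
            apply hndash
            rw [hc]
            rcases hg with ⟨-, h1, h2⟩
            cases hd2 : ln.drop (pos+1) with
            | nil => rw [hd2] at h2; simp at h2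
            | cons d ds =>
              rw [hd2] at h2
              simp only [List.head?_cons, Option.some.injEq] at h2
              simp [List.cons_prefix_cons, h1, h2])]
          rw [if_pos ⟨rfl, hsw⟩]
          rw [pvCleanLineB_go]
          rw [if_neg (by
            rintro ⟨ha1, h1 | h2⟩
            · rw [hb] at h1; omega
            · rw [hb] at h2
              rw [ha] at ha1 h2
              have := (pvFind_bounds ln ['-','-'] (pos+1) hlt (by simp) ha1).1
              omega)]
          rw [if_neg (by rw [hb]; omega)]
          rw [hb]
          have htn : ((pos : Int)).toNat + 1 = pos + 1 := by omega
          rw [htn]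
          rw [pvInside ln (ln.length - (pos+1)) (pos+1) le_rfl hlt]
          by_cases hti : PySem.Chars.findFrom ln ['`'] ((pos+1 : Nat) : Int) = -1
          · rw [if_pos hti, if_pos hti]
          · rw [if_neg hti, if_neg hti]
            have hbd := pvFind_bounds ln ['`'] (pos+1) hlt (by simp) hti
            exact ih fu ((PySem.Chars.findFrom ln ['`'] ((pos+1 : Nat) : Int)).toNat + 1)
              (by omega) (by omega) (by omega)
        · -- ordinary character: both scanners move on
          have hb := pvFind_step ln ['`','j','s','o','n',':'] pos hlt hjs
          have hsw : ¬ PySem.Chars.startswith (ln[pos] :: ln.drop (pos+1)) ['`','j','s','o','n',':'] = true := by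
            rw [← hc]
            exact fun hg => hjs (List.isPrefixOf_iff_prefix.1 hg)
          rw [hc]
          show pvCleanLineA_go ln pos false (ln[pos] :: ln.drop (pos+1)) = _
          rw [pvCleanLineA_go]
          rw [if_neg (by
            intro hg
            apply hndash
            rw [hc]
            rcases hg with ⟨-, h1, h2⟩
            cases hd2 : ln.drop (pos+1) with
            | nil => rw [hd2] at h2; simp at h2
            | cons d ds =>
              rw [hd2] at h2
              simp only [List.head?_cons, Option.some.injEq] at h2
              simp [List.cons_prefix_cons, h1, h2])]
          rw [if_neg (by rintro ⟨-, hg⟩; exact hsw hg), if_neg (by rintro ⟨hg, -⟩; simp at hg)]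
          rw [ih (fu+1) (pos+1) (by omega) hlt (by omega)]
          simp only [pvCleanLineB_go, ha, hb]

theorem pvLineEq (ln : List Char) : pvCleanLineA ln = pvCleanLineB ln := by
  have h := pvOutside ln ln.length (ln.length + 1) 0 (by omega) (by omega) (by omega)
  rw [List.drop_zero] at h
  unfold pvCleanLineA pvCleanLineB
  split
  · next hl =>
    have he : ln = [] := by simpa using hl
    subst he
    exact h
  · exact h

theorem pvRstripAppend (a b : List Char) :
    PySem.Chars.rstrip (a ++ b) =
      if PySem.Chars.rstrip b = [] then PySem.Chars.rstrip a else a ++ PySem.Chars.rstrip b := by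
  simp only [PySem.Chars.rstrip, List.reverse_append, List.dropWhile_append]
  by_cases hb : (List.dropWhile PySem.Chars.isspace b.reverse).isEmpty
  · have hbe : (List.dropWhile PySem.Chars.isspace b.reverse).reverse = [] := by
      simp [List.isEmpty_iff.1 hb]
    rw [if_pos hb, if_pos hbe]
  · have hbe : ¬ (List.dropWhile PySem.Chars.isspace b.reverse).reverse = [] := by
      simp only [List.reverse_eq_nil_iff]
      exact fun h => hb (by simp [h])
    rw [if_neg hb, if_neg hbe, List.reverse_append, List.reverse_reverse]

theorem pvJoinEq (ls : List (List Char)) :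
    PySem.Chars.rstrip (ls.flatMap (fun l => pvCleanLineA l ++ ['\n'])) =
      PySem.Chars.rstrip (PySem.Chars.join ['\n'] (ls.map pvCleanLineB)) := by
  induction ls with
  | nil => simp [PySem.Chars.join_nil]
  | cons l ls ih =>
    cases ls with
    | nil =>
      simp only [List.flatMap_cons, List.flatMap_nil, List.append_nil, List.map_cons,
        List.map_nil, PySem.Chars.join_singleton]
      rw [pvRstripAppend (pvCleanLineA l) ['\n'], pvLineEq]
      have hnl : PySem.Chars.rstrip ['\n'] = [] := by decide
      rw [if_pos hnl]
    | cons l2 ls2 =>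
      rw [List.flatMap_cons, List.map_cons, List.map_cons, PySem.Chars.join_cons_cons]
      simp only [List.map_cons] at ih
      rw [pvRstripAppend (pvCleanLineA l ++ ['\n']), pvRstripAppend (pvCleanLineB l ++ ['\n'])]
      rw [pvLineEq l, ih]

-- ===== VERDICT (by name: the statement is the Claim_ definition above) =====
theorem clean_comments_rstrip_keep_empty_lines_spec : Claim_equal_clean_comments_rstrip_keep_empty_lines := by
  intro schema _
  unfold Spec_clean_comments_rstrip_keep_empty_lines
  match schema with
  | none => rfl
  | some s =>
    simp only [clean_comments_rstrip_keep_empty_lines, clean_comments_rstrip_keep_empty_lines_alt]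
    rw [PySem.List.foldl_append_eq_flatMap (fun l => pvCleanLineA l ++ ['\n'])
      (PySem.Chars.splitlines s.toList) []]
    rw [List.nil_append, pvJoinEq]
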